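-- pv_equiv track=rewrite | github.com/jpritt/boiler | test.py | findNextGap
-- ===== SOURCE A (Python) =====
-- def findNextGap(cov, start, end, modeLen):
--     gap = False
--     for i in range(min(modeLen,end-start)):
--         if cov[start+i] > 0:
--             if gap:
--                 return [gap_start, i]
--         else:
--             if not gap:
--                 gap_start = i
--                 gap = True
--     if gap:
--         return [gap_start, i+1]
--     else:
--         return None
-- ===== SOURCE B (Python) =====
-- def findNextGap(cov, start, end, modeLen):
--     # Run-length view: walk the window as maximal runs of equal sign
--     # (positive vs non-positive); the first non-positive run is the gap
--     # and its boundaries are the answer.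
--     n = min(modeLen, end - start)
--     pos = 0
--     while pos < n:
--         positive = cov[start + pos] > 0
--         run = 1
--         while pos + run < n and (cov[start + pos + run] > 0) == positive:
--             run += 1
--         if not positive:
--             return [pos, pos + run]
--         pos += run
--     return None
-- ===== Notes on version B (the rewrite author's own statement) =====
-- stated objective: alternative
-- what changed: Replaces A's flat element-by-element scan carrying a boolean gap flag by a run-length traversal: an outer loop walks maximal same-sign runs (an inner loop measures each run) and returns the boundaries of the first non-positive run.
import Mathlib
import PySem

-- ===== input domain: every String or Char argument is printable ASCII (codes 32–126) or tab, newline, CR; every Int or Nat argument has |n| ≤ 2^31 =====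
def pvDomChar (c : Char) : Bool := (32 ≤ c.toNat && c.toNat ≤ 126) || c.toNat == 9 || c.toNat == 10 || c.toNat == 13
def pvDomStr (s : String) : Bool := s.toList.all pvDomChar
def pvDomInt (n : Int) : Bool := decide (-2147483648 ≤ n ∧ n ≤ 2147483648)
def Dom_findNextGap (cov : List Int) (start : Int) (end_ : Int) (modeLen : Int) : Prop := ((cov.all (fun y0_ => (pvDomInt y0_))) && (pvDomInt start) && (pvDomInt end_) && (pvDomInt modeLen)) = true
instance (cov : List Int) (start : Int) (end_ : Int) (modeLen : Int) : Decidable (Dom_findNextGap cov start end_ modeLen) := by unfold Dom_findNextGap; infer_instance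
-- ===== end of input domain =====

-- B replaces A's flat stateful scan (boolean gap flag + carried gap_start) by a run-length
-- traversal over maximal same-sign runs of the window; objective: alternative decomposition.

-- ===== PORT A =====
-- loop state: gap = none  ↔  Python's gap == False; gap = some gs  ↔  gap == True with gap_start = gs;
-- lastI carries the Python loop variable i from the previous iteration (read after the loop as i+1).
-- cov[start+i] is ported as (pyGet? …).getD 0: exact on Pre_, which admits exactly the inputs on
-- which every index A actually reads is a valid Python index.
def findNextGapGoA (cov : List Int) (start : Int) : List Int → Option Int → Int → Option (List Int)
  | [], gap, lastI =>
      match gap with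
      | some gs => some [gs, lastI + 1]
      | none => none
  | i :: rest, gap, _ =>
      if (PySem.List.pyGet? cov (start + i)).getD 0 > 0 then
        match gap with
        | some gs => some [gs, i]
        | none => findNextGapGoA cov start rest none i
      else
        match gap with
        | none => findNextGapGoA cov start rest (some i) i
        | some gs => findNextGapGoA cov start rest (some gs) i

def findNextGap (cov : List Int) (start : Int) (end_ : Int) (modeLen : Int) : Option (List Int) :=
  findNextGapGoA cov start (PySem.List.pyRange 0 (min modeLen (end_ - start)) 1) none 0

-- ===== PORT B =====
-- inner while loop of Source B: starting from q (= pos + run), advance while q < n and the sign of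
-- cov[start+q] still equals `positive`; returns the final pos + run (the exclusive run end).
-- The Nat fuel only makes the recursion structural; it is always large enough (n - q steps).
def findNextGapRunEnd (cov : List Int) (start : Int) (n : Int) (positive : Bool) : Nat → Int → Int
  | 0, q => q
  | fuel + 1, q =>
      if q < n then
        if decide (0 < (PySem.List.pyGet? cov (start + q)).getD 0) = positive then
          findNextGapRunEnd cov start n positive fuel (q + 1)
        else q
      else q

-- outer while loop of Source B: pos is the start of the current maximal run.
def findNextGapGoB (cov : List Int) (start : Int) (n : Int) : Nat → Int → Option (List Int)
  | 0, _ => none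
  | fuel + 1, pos =>
      if pos < n then
        let positive := decide (0 < (PySem.List.pyGet? cov (start + pos)).getD 0)
        let e := findNextGapRunEnd cov start n positive fuel (pos + 1)
        if positive then findNextGapGoB cov start n fuel e
        else some [pos, e]
      else none

def findNextGap_alt (cov : List Int) (start : Int) (end_ : Int) (modeLen : Int) : Option (List Int) :=
  findNextGapGoB cov start (min modeLen (end_ - start)) (min modeLen (end_ - start)).toNat 0

-- ===== PRECONDITION & SPEC =====
-- closed-form "A returns early": some non-positive element is followed, still inside [0, hi),
-- by a positive one (hi = first out-of-range scan offset); all quantified indices are valid.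
def pvEarlyRet (cov : List Int) (start : Int) (hi : Int) : Bool :=
  (PySem.List.pyRange 0 hi 1).any fun g =>
    decide ((PySem.List.pyGet? cov (start + g)).getD 0 ≤ 0) &&
    (PySem.List.pyRange (g + 1) hi 1).any fun j =>
      decide (0 < (PySem.List.pyGet? cov (start + j)).getD 0)

-- Pre_ holds EXACTLY when Python A returns (no IndexError): the window is empty, or it lies
-- entirely within valid indices, or A returns early — at a gap/resume pair — before reaching
-- the first out-of-range index. It excludes no input on which A returns a value.
def Pre_findNextGap (cov : List Int) (start : Int) (end_ : Int) (modeLen : Int) : Prop :=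
  min modeLen (end_ - start) ≤ 0 ∨
    (-(cov.length : Int) ≤ start ∧
      (start + min modeLen (end_ - start) ≤ cov.length ∨
        pvEarlyRet cov start ((cov.length : Int) - start) = true))
instance (cov : List Int) (start : Int) (end_ : Int) (modeLen : Int) : Decidable (Pre_findNextGap cov start end_ modeLen) := by unfold Pre_findNextGap; infer_instance

def pvWitness_findNextGap : List Int × Int × Int × Int := ([], 0, 0, 0)

def Spec_findNextGap (cov : List Int) (start : Int) (end_ : Int) (modeLen : Int) (out : Option (List Int)) : Prop := out = findNextGap_alt cov start end_ modeLen
instance (cov : List Int) (start : Int) (end_ : Int) (modeLen : Int) (out : Option (List Int)) : Decidable (Spec_findNextGap cov start end_ modeLen out) := by unfold Spec_findNextGap; infer_instance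

-- ===== CLAIM (what is proved, stated in full; the proofs are below) =====
def Claim_equal_findNextGap : Prop := ∀ (cov : List Int) (start : Int) (end_ : Int) (modeLen : Int), Dom_findNextGap cov start end_ modeLen → Pre_findNextGap cov start end_ modeLen → Spec_findNextGap cov start end_ modeLen (findNextGap cov start end_ modeLen)

-- ===== LEMMAS AND PROOFS =====

-- proof-side characterization: first index in the range with non-positive coverage …
def findNextGapFirst (cov : List Int) (start : Int) : List Int → Option Int
  | [] => none
  | i :: rest =>
      if (PySem.List.pyGet? cov (start + i)).getD 0 ≤ 0 then some i
      else findNextGapFirst cov start rest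

-- … and first index in the range where coverage resumes.
def findNextGapEnd (cov : List Int) (start : Int) : List Int → Option Int
  | [] => none
  | j :: rest =>
      if (PySem.List.pyGet? cov (start + j)).getD 0 > 0 then some j
      else findNextGapEnd cov start rest

-- A-side: gap phase — once gap_start gs is fixed, A's remaining scan is the resume search,
-- falling through to [gs, n].
theorem findNextGapGoA_some (cov : List Int) (start : Int) (n : Int) (gs : Int) :
    ∀ a : Int, a ≤ n →
      findNextGapGoA cov start (PySem.List.pyRange a n 1) (some gs) (a - 1) =
        match findNextGapEnd cov start (PySem.List.pyRange a n 1) with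
        | some j => some [gs, j]
        | none => some [gs, n] := by
  intro a ha
  generalize hk : (n - a).toNat = k at *
  induction k generalizing a with
  | zero =>
      have hba : n ≤ a := by omega
      rw [PySem.List.pyRange_one_eq_nil hba]
      have : a = n := le_antisymm ha hba
      simp [findNextGapGoA, findNextGapEnd, this]
  | succ k ih =>
      have hab : a < n := by omega
      rw [PySem.List.pyRange_one_cons hab]
      by_cases h : (PySem.List.pyGet? cov (start + a)).getD 0 > 0
      · simp [findNextGapGoA, findNextGapEnd, h]
      · simp only [findNextGapGoA, findNextGapEnd, if_neg h]
        have := ih (a + 1) (by omega) (by omega)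
        simpa using this

-- A-side: search phase — with no gap yet, A's scan is the gap search followed by the gap phase.
theorem findNextGapGoA_none (cov : List Int) (start : Int) (n : Int) :
    ∀ a lastI : Int, a ≤ n →
      findNextGapGoA cov start (PySem.List.pyRange a n 1) none lastI =
        match findNextGapFirst cov start (PySem.List.pyRange a n 1) with
        | none => none
        | some f =>
            match findNextGapEnd cov start (PySem.List.pyRange (f + 1) n 1) with
            | some j => some [f, j]
            | none => some [f, n] := by
  intro a lastI ha
  generalize hk : (n - a).toNat = k at *
  induction k generalizing a lastI with
  | zero =>
      have hba : n ≤ a := by omega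
      rw [PySem.List.pyRange_one_eq_nil hba]
      simp [findNextGapGoA, findNextGapFirst]
  | succ k ih =>
      have hab : a < n := by omega
      rw [PySem.List.pyRange_one_cons hab]
      by_cases h : (PySem.List.pyGet? cov (start + a)).getD 0 > 0
      · have h' : ¬ (PySem.List.pyGet? cov (start + a)).getD 0 ≤ 0 := by omega
        simp only [findNextGapGoA, findNextGapFirst, if_pos h, if_neg h']
        exact ih (a + 1) a (by omega) (by omega)
      · have h' : (PySem.List.pyGet? cov (start + a)).getD 0 ≤ 0 := by omega
        simp only [findNextGapGoA, findNextGapFirst, if_neg h, if_pos h']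
        have := findNextGapGoA_some cov start n a (a + 1) (by omega)
        simpa using this

-- B-side: the run end never moves left.
theorem le_findNextGapRunEnd (cov : List Int) (start : Int) (n : Int) (positive : Bool) :
    ∀ (fuel : Nat) (q : Int), q ≤ findNextGapRunEnd cov start n positive fuel q := by
  intro fuel
  induction fuel with
  | zero => intro q; simp [findNextGapRunEnd]
  | succ fuel ih =>
      intro q
      unfold findNextGapRunEnd
      split
      · split
        · have := ih (q + 1); omega
        · omega
      · omega

-- B-side: the inner loop with positive = false finds the resume point (or falls through to n).
theorem findNextGapRunEnd_false (cov : List Int) (start : Int) (n : Int) :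
    ∀ (fuel : Nat) (q : Int), q ≤ n → (n - q).toNat ≤ fuel →
      findNextGapRunEnd cov start n false fuel q =
        (findNextGapEnd cov start (PySem.List.pyRange q n 1)).getD n := by
  intro fuel
  induction fuel with
  | zero =>
      intro q hq hf
      have : q = n := by omega
      rw [this, PySem.List.pyRange_one_eq_nil le_rfl]
      simp [findNextGapRunEnd, findNextGapEnd]
  | succ fuel ih =>
      intro q hq hf
      by_cases hab : q < n
      · rw [PySem.List.pyRange_one_cons hab]
        unfold findNextGapRunEnd
        rw [if_pos hab]
        by_cases h : (PySem.List.pyGet? cov (start + q)).getD 0 > 0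
        · rw [if_neg (by simp [h])]
          simp [findNextGapEnd, h]
        · rw [if_pos (by simp; omega)]
          rw [ih (q + 1) (by omega) (by omega)]
          simp [findNextGapEnd, h]
      · have : q = n := by omega
        rw [this, PySem.List.pyRange_one_eq_nil le_rfl]
        unfold findNextGapRunEnd
        rw [if_neg (by omega)]
        simp [findNextGapEnd]

-- B-side: the inner loop with positive = true skips indices the gap search would skip anyway.
theorem findNextGapRunEnd_true (cov : List Int) (start : Int) (n : Int) :
    ∀ (fuel : Nat) (q : Int), q ≤ n → (n - q).toNat ≤ fuel →
      findNextGapFirst cov start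
          (PySem.List.pyRange (findNextGapRunEnd cov start n true fuel q) n 1) =
        findNextGapFirst cov start (PySem.List.pyRange q n 1) ∧
      findNextGapRunEnd cov start n true fuel q ≤ n := by
  intro fuel
  induction fuel with
  | zero =>
      intro q hq hf
      have : q = n := by omega
      simp [findNextGapRunEnd, this]
  | succ fuel ih =>
      intro q hq hf
      by_cases hab : q < n
      · by_cases h : (PySem.List.pyGet? cov (start + q)).getD 0 > 0
        · have step : findNextGapRunEnd cov start n true (fuel + 1) q =
              findNextGapRunEnd cov start n true fuel (q + 1) := by
            conv_lhs => rw [findNextGapRunEnd]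
            rw [if_pos hab, if_pos (decide_eq_true h)]
          have := ih (q + 1) (by omega) (by omega)
          refine ⟨?_, by omega⟩
          rw [step, this.1, PySem.List.pyRange_one_cons hab]
          simp [findNextGapFirst, h]
        · have stop : findNextGapRunEnd cov start n true (fuel + 1) q = q := by
            conv_lhs => rw [findNextGapRunEnd]
            rw [if_pos hab, if_neg (by simp; omega)]
          exact ⟨by rw [stop], by omega⟩
      · have stop : findNextGapRunEnd cov start n true (fuel + 1) q = q := by
          conv_lhs => rw [findNextGapRunEnd]
          rw [if_neg (by omega)]
        exact ⟨by rw [stop], by omega⟩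

-- B-side: with enough fuel, the run-length walk computes the gap-search/resume-search
-- characterization.
theorem findNextGapGoB_char (cov : List Int) (start : Int) (n : Int) :
    ∀ (fuel : Nat) (pos : Int), (n - pos).toNat ≤ fuel →
      findNextGapGoB cov start n fuel pos =
        match findNextGapFirst cov start (PySem.List.pyRange pos n 1) with
        | none => none
        | some f =>
            match findNextGapEnd cov start (PySem.List.pyRange (f + 1) n 1) with
            | some j => some [f, j]
            | none => some [f, n] := by
  intro fuel
  induction fuel with
  | zero =>
      intro pos hf
      rw [PySem.List.pyRange_one_eq_nil (by omega)]
      simp [findNextGapGoB, findNextGapFirst]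
  | succ fuel ih =>
      intro pos hf
      by_cases hab : pos < n
      · rw [PySem.List.pyRange_one_cons hab]
        by_cases h : (PySem.List.pyGet? cov (start + pos)).getD 0 > 0
        · have h' : ¬ (PySem.List.pyGet? cov (start + pos)).getD 0 ≤ 0 := by omega
          have hrun := findNextGapRunEnd_true cov start n fuel (pos + 1) (by omega) (by omega)
          have hle := le_findNextGapRunEnd cov start n true fuel (pos + 1)
          have hdec : decide (0 < (PySem.List.pyGet? cov (start + pos)).getD 0) = true :=
            decide_eq_true h
          unfold findNextGapGoB
          rw [if_pos hab, hdec, if_pos rfl]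
          rw [ih (findNextGapRunEnd cov start n true fuel (pos + 1)) (by omega)]
          rw [hrun.1]
          simp [findNextGapFirst, h']
        · have h' : (PySem.List.pyGet? cov (start + pos)).getD 0 ≤ 0 := by omega
          have hdec : decide (0 < (PySem.List.pyGet? cov (start + pos)).getD 0) = false :=
            decide_eq_false h
          unfold findNextGapGoB
          rw [if_pos hab, hdec, if_neg Bool.false_ne_true]
          rw [findNextGapRunEnd_false cov start n fuel (pos + 1) (by omega) (by omega)]
          simp only [findNextGapFirst, if_pos h']
          cases hE : findNextGapEnd cov start (PySem.List.pyRange (pos + 1) n 1) with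
          | none => simp
          | some j => simp
      · rw [PySem.List.pyRange_one_eq_nil (by omega)]
        unfold findNextGapGoB
        rw [if_neg hab]
        simp [findNextGapFirst]

-- the ports agree on every input (Pre_ is only needed for faithfulness to Python)
theorem findNextGap_eq_alt (cov : List Int) (start : Int) (end_ : Int) (modeLen : Int) :
    findNextGap cov start end_ modeLen = findNextGap_alt cov start end_ modeLen := by
  unfold findNextGap findNextGap_alt
  rw [findNextGapGoB_char cov start (min modeLen (end_ - start))
        (min modeLen (end_ - start)).toNat 0 (by omega)]
  by_cases hn : 0 ≤ min modeLen (end_ - start)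
  · exact findNextGapGoA_none cov start (min modeLen (end_ - start)) 0 0 hn
  · rw [PySem.List.pyRange_one_eq_nil (show min modeLen (end_ - start) ≤ (0:Int) by omega)]
    simp [findNextGapGoA, findNextGapFirst]

-- ===== VERDICT (by name: the statement is the Claim_ definition above) =====
theorem findNextGap_spec : Claim_equal_findNextGap := by
  intro cov start end_ modeLen _ _
  exact findNextGap_eq_alt cov start end_ modeLen
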